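-- pv_equiv track=rewrite | github.com/milckywayy/ODAS-Project | utils/validation.py | is_valid_password
-- ===== SOURCE A (Python) =====
-- def is_valid_password(password):
--     # Min 14 characters. At least one letter, one digit, and one special character
--     if not password or len(password) < 14:
--         return False
--     return (
--         any(char.isdigit() for char in password) and
--         any(char.isalpha() for char in password) and
--         any(char in '!@#$%^&*()-_=+[]{};:,<.>/?' for char in password)
--     )
-- ===== SOURCE B (Python) =====
-- SPECIALS = '!@#$%^&*()-_=+[]{};:,<.>/?'
--
-- def is_valid_password(password):
--     if not password or len(password) < 14:
--         return False
--     has_digit = has_alpha = has_special = False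
--     for char in password:
--         if char.isdigit():
--             has_digit = True
--         elif char.isalpha():
--             has_alpha = True
--         elif char in SPECIALS:
--             has_special = True
--         if has_digit and has_alpha and has_special:
--             break
--     return has_digit and has_alpha and has_special
-- ===== Notes on version B (the rewrite author's own statement) =====
-- stated objective: simpler
-- what changed: Replaces three independent any() scans over the password with one single pass maintaining three booleans (with early exit once all are set).
import Mathlib
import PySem

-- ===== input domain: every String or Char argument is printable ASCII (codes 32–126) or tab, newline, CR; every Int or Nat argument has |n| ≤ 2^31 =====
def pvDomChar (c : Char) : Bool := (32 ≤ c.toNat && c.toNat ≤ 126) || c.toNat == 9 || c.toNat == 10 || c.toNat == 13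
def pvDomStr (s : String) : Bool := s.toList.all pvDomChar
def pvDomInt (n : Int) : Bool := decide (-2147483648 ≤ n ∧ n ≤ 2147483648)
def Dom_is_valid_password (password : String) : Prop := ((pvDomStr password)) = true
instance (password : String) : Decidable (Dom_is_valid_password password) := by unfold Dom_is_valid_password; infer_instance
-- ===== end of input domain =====

-- B replaces A's three independent any() scans by one single pass over the characters
-- maintaining three booleans with an early exit; objective: simpler.


-- ===== PORT A =====
-- the characters of '!@#$%^&*()-_=+[]{};:,<.>/?' (verbatim, as a char list)
def pvSpecialsA : List Char := ['!','@','#','$','%','^','&','*','(',')','-','_','=','+','[',']','{','}',';',':',',','<','.','>','/','?']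

def is_valid_password (password : String) : Bool :=
  if password.toList = [] ∨ PySem.Str.len password < 14 then false
  else
    (password.toList.any (fun c => PySem.Chars.isdigit c)) &&
    (password.toList.any (fun c => PySem.Chars.isalpha c)) &&
    (password.toList.any (fun c => pvSpecialsA.contains c))

-- ===== PORT B =====
-- the characters of '!@#$%^&*()-_=+[]{};:,<.>/?' (verbatim, as a char list)
def pvSpecialsB : List Char := ['!','@','#','$','%','^','&','*','(',')','-','_','=','+','[',']','{','}',';',':',',','<','.','>','/','?']

-- the single-pass loop of Source B: elif chain updating three flags, early break when all set
def pvScan : List Char → Bool → Bool → Bool → Bool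
  | [], d, a, s => d && a && s
  | c :: rest, d, a, s =>
    let st : Bool × Bool × Bool :=
      if PySem.Chars.isdigit c then (true, a, s)
      else if PySem.Chars.isalpha c then (d, true, s)
      else if pvSpecialsB.contains c then (d, a, true)
      else (d, a, s)
    if st.1 && st.2.1 && st.2.2 then true
    else pvScan rest st.1 st.2.1 st.2.2

def is_valid_password_alt (password : String) : Bool :=
  if password.toList = [] ∨ PySem.Str.len password < 14 then false
  else pvScan password.toList false false false

-- ===== PRECONDITION & SPEC =====
def Spec_is_valid_password (password : String) (out : Bool) : Prop := out = is_valid_password_alt password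
instance (password : String) (out : Bool) : Decidable (Spec_is_valid_password password out) := by unfold Spec_is_valid_password; infer_instance

-- ===== CLAIM (what is proved, stated in full; the proofs are below) =====
def Claim_equal_is_valid_password : Prop := ∀ (password : String), Dom_is_valid_password password → Spec_is_valid_password password (is_valid_password password)

-- ===== LEMMAS AND PROOFS =====

-- digits, letters and the special characters are pairwise disjoint classes of chars
lemma pv_digit_not_alpha (c : Char) (h : PySem.Chars.isdigit c = true) :
    PySem.Chars.isalpha c = false := by
  simp [PySem.Chars.isdigit, Char.le_def, UInt32.le_iff_toNat_le] at h
  simp [PySem.Chars.isalpha, PySem.Chars.isupper, PySem.Chars.islower, Char.le_def,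
    UInt32.le_iff_toNat_le]
  omega

lemma pv_special_char (c : Char) (hc : c ∈ pvSpecialsB) :
    PySem.Chars.isdigit c = false ∧ PySem.Chars.isalpha c = false := by
  fin_cases hc <;> exact ⟨by decide, by decide⟩

lemma pv_digit_not_special (c : Char) (h : PySem.Chars.isdigit c = true) :
    pvSpecialsB.contains c = false := by
  rw [Bool.eq_false_iff]
  intro hc
  rw [List.contains_iff_mem] at hc
  exact absurd h (by simp [(pv_special_char c hc).1])

lemma pv_alpha_not_special (c : Char) (h : PySem.Chars.isalpha c = true) :
    pvSpecialsB.contains c = false := by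
  rw [Bool.eq_false_iff]
  intro hc
  rw [List.contains_iff_mem] at hc
  exact absurd h (by simp [(pv_special_char c hc).2])

-- the single pass computes exactly the three any() scans, or-ed onto the incoming flags
lemma pvScan_eq (l : List Char) : ∀ d a s : Bool,
    pvScan l d a s =
      ((d || l.any (fun c => PySem.Chars.isdigit c)) &&
       (a || l.any (fun c => PySem.Chars.isalpha c)) &&
       (s || l.any (fun c => pvSpecialsB.contains c))) := by
  induction l with
  | nil => intro d a s; simp [pvScan]
  | cons c rest ih =>
    intro d a s
    by_cases hd : PySem.Chars.isdigit c = true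
    · have ha := pv_digit_not_alpha c hd
      have hs := pv_digit_not_special c hd
      simp only [pvScan, hd, if_pos, ih, List.any_cons, ha, hs]
      cases a <;> cases s <;> simp
    · by_cases ha : PySem.Chars.isalpha c = true
      · have hs := pv_alpha_not_special c ha
        simp only [pvScan, hd, ha, if_pos, ih, List.any_cons, hs]
        simp only [Bool.not_eq_true] at hd
        simp
        cases d <;> cases s <;> simp
      · by_cases hs : pvSpecialsB.contains c = true
        · simp only [pvScan, hd, ha, hs, ih, List.any_cons]
          simp only [Bool.not_eq_true] at hd ha
          simp
          cases d <;> cases a <;> simp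
        · simp only [pvScan, hd, ha, hs, ih, List.any_cons]
          simp only [Bool.not_eq_true] at hd ha hs
          simp
          cases d <;> cases a <;> cases s <;> simp

-- ===== VERDICT (by name: the statement is the Claim_ definition above) =====
theorem is_valid_password_spec : Claim_equal_is_valid_password := by
  intro password _
  unfold Spec_is_valid_password is_valid_password is_valid_password_alt
  rw [pvScan_eq]
  simp only [Bool.false_or, pvSpecialsA, pvSpecialsB]
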